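-- pv_equiv track=rewrite | github.com/15680676726/superSpider | src/copaw/kernel/buddy_onboarding_service.py | _normalize_buddy_lane_hint
-- ===== SOURCE A (Python) =====
-- import unicodedata
--
-- def _normalize_buddy_lane_hint(value: str | None) -> str:
--     normalized = unicodedata.normalize("NFKC", str(value or "")).strip().lower()
--     if not normalized:
--         return ""
--     parts: list[str] = []
--     current: list[str] = []
--     for char in normalized:
--         if char.isalnum():
--             current.append(char)
--             continue
--         if current:
--             parts.append("".join(current))
--             current = []
--     if current:
--         parts.append("".join(current))
--     return "-".join(part for part in parts if part).strip("-")
-- ===== SOURCE B (Python) =====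
-- import unicodedata
--
-- def _normalize_buddy_lane_hint(value):
--     normalized = unicodedata.normalize("NFKC", str(value or "")).strip().lower()
--     if not normalized:
--         return ""
--     cleaned = "".join(c if c.isalnum() else " " for c in normalized)
--     return "-".join(cleaned.split())
-- ===== Notes on version B (the rewrite author's own statement) =====
-- stated objective: simpler
-- what changed: Replaces the char-accumulator state machine (parts/current lists, duplicated flush logic, trailing filter and strip) with a stateless map of non-alphanumerics to spaces followed by str.split(), which does the tokenization itself.
import Mathlib
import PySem

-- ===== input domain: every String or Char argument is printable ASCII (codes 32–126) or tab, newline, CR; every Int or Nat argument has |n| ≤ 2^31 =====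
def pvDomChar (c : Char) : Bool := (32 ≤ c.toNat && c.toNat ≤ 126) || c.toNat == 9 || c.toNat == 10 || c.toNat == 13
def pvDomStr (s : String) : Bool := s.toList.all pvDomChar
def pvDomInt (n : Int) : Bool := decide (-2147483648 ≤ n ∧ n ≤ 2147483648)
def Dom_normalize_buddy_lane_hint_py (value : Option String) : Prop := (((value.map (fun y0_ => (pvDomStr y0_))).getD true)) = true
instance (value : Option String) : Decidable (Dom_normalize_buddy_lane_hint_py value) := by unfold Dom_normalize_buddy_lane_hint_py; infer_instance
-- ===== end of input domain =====

-- B replaces A's two-accumulator state machine (with its flush duplication, trailing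
-- filter and strip('-')) by mapping non-alphanumerics to spaces and letting str.split()
-- tokenize; objective: simpler.

-- ===== PORT A =====
-- A's for-loop over `normalized` with its `parts`/`current` accumulators, branch for branch.
-- (tokens are kept as List Char; Python's "".join(current) is the token itself)
def pvALoop : List Char → List (List Char) → List Char → List (List Char)
  | [], parts, current => if current.isEmpty then parts else parts ++ [current]
  | c :: rest, parts, current =>
    if PySem.Chars.isalnum c then pvALoop rest parts (current ++ [c])
    else if current.isEmpty then pvALoop rest parts current
    else pvALoop rest (parts ++ [current]) []

-- unicodedata.normalize("NFKC", ·) is the identity on the printable-ASCII domain;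
-- str(value or "") is (value.getD "") since both None and "" give "".
def normalize_buddy_lane_hint_py (value : Option String) : String :=
  let normalized := PySem.Chars.lower (PySem.Chars.strip (value.getD "").toList)
  if normalized.isEmpty then ""
  else
    String.ofList (PySem.Chars.stripChars
      (PySem.Chars.join ['-'] ((pvALoop normalized [] []).filter (fun p => !p.isEmpty))) ['-'])

-- ===== PORT B =====
def normalize_buddy_lane_hint_py_alt (value : Option String) : String :=
  let normalized := PySem.Chars.lower (PySem.Chars.strip (value.getD "").toList)
  if normalized.isEmpty then ""
  else
    let cleaned := normalized.map (fun c => if PySem.Chars.isalnum c then c else ' ')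
    String.ofList (PySem.Chars.join ['-'] (PySem.Chars.split₀ cleaned))

-- ===== PRECONDITION & SPEC =====
def Spec_normalize_buddy_lane_hint_py (value : Option String) (out : String) : Prop := out = normalize_buddy_lane_hint_py_alt value
instance (value : Option String) (out : String) : Decidable (Spec_normalize_buddy_lane_hint_py value out) := by unfold Spec_normalize_buddy_lane_hint_py; infer_instance

-- ===== CLAIM (what is proved, stated in full; the proofs are below) =====
def Claim_equal_normalize_buddy_lane_hint_py : Prop := ∀ (value : Option String), Dom_normalize_buddy_lane_hint_py value → Spec_normalize_buddy_lane_hint_py value (normalize_buddy_lane_hint_py value)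

-- ===== LEMMAS AND PROOFS =====

-- PySem's isalnum/isspace ranges are disjoint (for every Char, no domain hypothesis needed).
theorem alnum_not_space (c : Char) : PySem.Chars.isalnum c = true → PySem.Chars.isspace c = false := by
  simp only [PySem.Chars.isalnum, PySem.Chars.isalpha, PySem.Chars.isupper, PySem.Chars.islower,
    PySem.Chars.isdigit, PySem.Chars.isspace, Char.le_def, UInt32.le_iff_toNat_le, Char.toNat,
    Bool.or_eq_true, Bool.and_eq_true, decide_eq_true_eq, Bool.or_eq_false_iff,
    Bool.and_eq_false_iff, decide_eq_false_iff_not]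
  have h1 : ('0' : Char).val.toNat = 48 := rfl
  have h2 : ('9' : Char).val.toNat = 57 := rfl
  have h3 : ('A' : Char).val.toNat = 65 := rfl
  have h4 : ('Z' : Char).val.toNat = 90 := rfl
  have h5 : ('a' : Char).val.toNat = 97 := rfl
  have h6 : ('z' : Char).val.toNat = 122 := rfl
  omega

-- B's split₀ on the space-mapped characters runs in lockstep with A's accumulator loop:
-- split₀'s (reversed-word, reversed-token-list) state is A's (current, parts), reversed.
theorem go_eq (cs : List Char) (acc : List (List Char)) (current : List Char) :
    PySem.Chars.split₀.go (cs.map (fun c => if PySem.Chars.isalnum c then c else ' '))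
      current.reverse acc = pvALoop cs acc.reverse current := by
  induction cs generalizing acc current with
  | nil =>
    simp only [List.map_nil, PySem.Chars.split₀.go, pvALoop, List.isEmpty_reverse]
    by_cases h : current.isEmpty <;> simp [h]
  | cons c rest ih =>
    by_cases ha : PySem.Chars.isalnum c
    · have hs := alnum_not_space c ha
      simp only [List.map_cons, PySem.Chars.split₀.go, hs, Bool.false_eq_true,
        pvALoop, if_pos ha]
      have := ih acc (current ++ [c])
      simpa using this
    · simp only [List.map_cons, PySem.Chars.split₀.go, pvALoop, if_neg ha,
        List.isEmpty_reverse, show PySem.Chars.isspace ' ' = true from rfl]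
      by_cases hc : current.isEmpty
      · have hnil : current = [] := List.isEmpty_iff.mp hc
        subst hnil
        simpa using ih acc ([] : List Char)
      · simp only [hc, Bool.false_eq_true, if_false, List.reverse_reverse]
        have := ih (current :: acc) ([] : List Char)
        simp only [List.reverse_nil, List.reverse_cons] at this
        exact this

def pvTokOk (p : List Char) : Prop := p ≠ [] ∧ ∀ ch ∈ p, PySem.Chars.isalnum ch = true

-- A's loop only ever emits non-empty, all-alphanumeric tokens.
theorem pvALoop_tokens (cs : List Char) (parts : List (List Char)) (current : List Char)
    (hp : ∀ p ∈ parts, pvTokOk p) (hc : ∀ ch ∈ current, PySem.Chars.isalnum ch = true) :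
    ∀ p ∈ pvALoop cs parts current, pvTokOk p := by
  induction cs generalizing parts current with
  | nil =>
    by_cases h : current.isEmpty
    · simpa [pvALoop, h] using hp
    · simp only [pvALoop, h, Bool.false_eq_true, if_false]
      intro p hmem
      rcases List.mem_append.mp hmem with h1 | h1
      · exact hp p h1
      · simp only [List.mem_singleton] at h1
        subst h1
        exact ⟨fun hn => by simp [hn] at h, hc⟩
  | cons c rest ih =>
    by_cases ha : PySem.Chars.isalnum c
    · simp only [pvALoop, if_pos ha]
      exact ih parts (current ++ [c]) hp (by
        intro ch hm
        rcases List.mem_append.mp hm with h1 | h1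
        · exact hc ch h1
        · simp only [List.mem_singleton] at h1; subst h1; exact ha)
    · simp only [pvALoop, if_neg ha]
      by_cases hcur : current.isEmpty
      · simp only [hcur, if_true]
        exact ih parts current hp hc
      · simp only [hcur, Bool.false_eq_true, if_false]
        refine ih (parts ++ [current]) [] ?_ (by simp)
        intro p hmem
        rcases List.mem_append.mp hmem with h1 | h1
        · exact hp p h1
        · simp only [List.mem_singleton] at h1
          subst h1
          exact ⟨fun hn => by simp [hn] at hcur, hc⟩

theorem alnum_ne_hyphen (c : Char) (h : PySem.Chars.isalnum c = true) : c ≠ '-' := by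
  intro he; subst he; simp [PySem.Chars.isalnum, PySem.Chars.isalpha, PySem.Chars.isupper,
    PySem.Chars.islower, PySem.Chars.isdigit] at h

theorem join_cons_head (a : Char) (t : List Char) (rest : List (List Char)) :
    ∃ u, PySem.Chars.join ['-'] ((a :: t) :: rest) = a :: u := by
  cases rest with
  | nil => exact ⟨t, by simp [PySem.Chars.join, List.intercalate]⟩
  | cons b rs =>
    exact ⟨t ++ '-' :: List.intercalate ['-'] (b :: rs),
      by simp [PySem.Chars.join, List.intercalate, List.intersperse]⟩

-- The hyphen-join of ok tokens starts with an alphanumeric char, so lstrip('-') drops nothing.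
theorem dropWhile_join (T : List (List Char)) (h : ∀ p ∈ T, pvTokOk p) :
    List.dropWhile (fun ch => (['-'] : List Char).contains ch) (PySem.Chars.join ['-'] T)
      = PySem.Chars.join ['-'] T := by
  cases T with
  | nil => simp [PySem.Chars.join, List.intercalate]
  | cons tok rest =>
    obtain ⟨hne, hal⟩ := h tok (by simp)
    obtain ⟨a, t, rfl⟩ := List.exists_cons_of_ne_nil hne
    obtain ⟨u, hu⟩ := join_cons_head a t rest
    rw [hu, List.dropWhile_cons]
    have : (['-'] : List Char).contains a = false := by
      simp [alnum_ne_hyphen a (hal a (by simp))]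
    simp only [this, Bool.false_eq_true, if_false]

-- … and it ends with an alphanumeric char.
theorem getLast?_join_alnum (T : List (List Char)) (h : ∀ p ∈ T, pvTokOk p)
    (c : Char) (hc : (PySem.Chars.join ['-'] T).getLast? = some c) :
    PySem.Chars.isalnum c = true := by
  induction T with
  | nil => simp [PySem.Chars.join, List.intercalate] at hc
  | cons tok rest ih =>
    cases rest with
    | nil =>
      have htok : PySem.Chars.join ['-'] [tok] = tok := by simp [PySem.Chars.join, List.intercalate]
      obtain ⟨hn, hal⟩ := h tok (by simp)
      rw [htok] at hc
      exact hal c (List.mem_of_getLast? hc)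
    | cons b rs =>
      obtain ⟨hn2, hal2⟩ := h b (by simp)
      obtain ⟨a2, t2, heq⟩ := List.exists_cons_of_ne_nil hn2
      have hjne : PySem.Chars.join ['-'] (b :: rs) ≠ [] := by
        subst heq
        obtain ⟨u, hu⟩ := join_cons_head a2 t2 rs
        simp [hu]
      have hsplit : PySem.Chars.join ['-'] (tok :: b :: rs)
          = (tok ++ ['-']) ++ PySem.Chars.join ['-'] (b :: rs) := by
        simp [PySem.Chars.join, List.intercalate, List.intersperse]
      rw [hsplit, List.getLast?_append_of_ne_nil _ hjne] at hc
      exact ih (fun p hp => h p (by simp [hp])) hc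

-- Hence A's trailing .strip('-') is the identity on the join of ok tokens.
theorem strip_join (T : List (List Char)) (h : ∀ p ∈ T, pvTokOk p) :
    PySem.Chars.stripChars (PySem.Chars.join ['-'] T) ['-'] = PySem.Chars.join ['-'] T := by
  simp only [PySem.Chars.stripChars]
  rw [dropWhile_join T h]
  by_cases hj : PySem.Chars.join ['-'] T = []
  · simp [hj]
  · have hrev : (PySem.Chars.join ['-'] T).reverse ≠ [] := by simp [hj]
    obtain ⟨c, cs, hcons⟩ := List.exists_cons_of_ne_nil hrev
    have hc : (PySem.Chars.join ['-'] T).getLast? = some c := by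
      rw [← List.head?_reverse, hcons]; rfl
    have hal := getLast?_join_alnum T h c hc
    rw [hcons, List.dropWhile_cons]
    have hpc : (['-'] : List Char).contains c = false := by
      simp [alnum_ne_hyphen c hal]
    simp only [hpc, Bool.false_eq_true, if_false]
    rw [← hcons, List.reverse_reverse]

theorem main_eq (value : Option String) :
    normalize_buddy_lane_hint_py value = normalize_buddy_lane_hint_py_alt value := by
  unfold normalize_buddy_lane_hint_py normalize_buddy_lane_hint_py_alt
  set ns := PySem.Chars.lower (PySem.Chars.strip (value.getD "").toList) with hns
  by_cases he : ns.isEmpty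
  · simp [he]
  · simp only [he, Bool.false_eq_true, if_false]
    have htok : ∀ p ∈ pvALoop ns [] [], pvTokOk p :=
      pvALoop_tokens ns [] [] (by simp) (by simp)
    have hf : (pvALoop ns [] []).filter (fun p => !p.isEmpty) = pvALoop ns [] [] :=
      List.filter_eq_self.mpr (fun p hp => by simpa using (htok p hp).1)
    have hgo : PySem.Chars.split₀ (ns.map (fun c => if PySem.Chars.isalnum c then c else ' '))
        = pvALoop ns [] [] := by
      simpa [PySem.Chars.split₀] using go_eq ns [] []
    rw [hf, hgo, strip_join _ htok]

-- ===== VERDICT (by name: the statement is the Claim_ definition above) =====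
theorem normalize_buddy_lane_hint_py_spec : Claim_equal_normalize_buddy_lane_hint_py := by
  intro value _
  exact main_eq value
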